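-- pv_equiv track=rewrite | github.com/jbscwy/orgMiner | git_store/my/orgMiner/evaluate/资源组执行模式矩阵.py | _after_resource_group_matrix
-- ===== SOURCE A (Python) =====
-- def _after_resource_group_matrix(resource_group_matrix,resource_matrix,labels):
--     # 获取全分配执行组执行模式矩阵
--     import copy
--     copy_resource_group_matrix = copy.copy(resource_group_matrix)
--     rgm = [[0 for col in range(len(resource_group_matrix[0]))] for row in range(len(resource_group_matrix))]
--     for rg in range(len(resource_group_matrix)):
--         for i in range(len(labels)):
--             if rg == labels[i]:
--                 add_array(rgm[rg], resource_matrix[i])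
--     # 两个矩阵相乘
--     full_resource_group_matrix = multiply_matrix(copy_resource_group_matrix, rgm)
--     return full_resource_group_matrix
--
-- def add_array(a,b):
--     for i in range(len(a)):
--         a[i]=a[i]+b[i]
--     return a
--
-- def multiply_matrix(copy_resource_group_matrix,rgm):
--     full_resource_group_matrix=[[0 for col in range(len(copy_resource_group_matrix[0]))] for row in range(len(copy_resource_group_matrix))]
--     for i in range(len(copy_resource_group_matrix)):
--         for j in range(len(copy_resource_group_matrix[0])):
--             full_resource_group_matrix[i][j]=copy_resource_group_matrix[i][j]*rgm[i][j]
--     return full_resource_group_matrix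
-- ===== SOURCE B (Python) =====
-- def _after_resource_group_matrix(resource_group_matrix, resource_matrix, labels):
--     # One pass over labels scattering each resource row into its group bucket,
--     # instead of scanning all labels once per group: O((R+L)*C) vs A's O(R*L*C).
--     R = len(resource_group_matrix)
--     C = len(resource_group_matrix[0]) if resource_group_matrix else 0
--     buckets = [[0] * C for _ in range(R)]
--     for i in range(len(labels)):
--         lbl = labels[i]
--         if 0 <= lbl < R:
--             row = buckets[lbl]
--             src = resource_matrix[i]
--             buckets[lbl] = [row[j] + src[j] for j in range(C)]
--     return [[resource_group_matrix[r][j] * buckets[r][j] for j in range(C)]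
--             for r in range(R)]
-- ===== Notes on version B (the rewrite author's own statement) =====
-- stated objective: faster
-- what changed: Instead of scanning the whole label list once per resource group (nested R x L loop), B makes a single pass over the labels scattering each resource row directly into its group's bucket (guarding 0 <= label < R), then does the same elementwise product.
-- outside the precondition, e.g. on _after_resource_group_matrix([[1, 2]], [[3]], [0]): A raises IndexError, B raises IndexError; on _after_resource_group_matrix([[1, 2]], [], [0]): A raises IndexError, B raises IndexError
import Mathlib
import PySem

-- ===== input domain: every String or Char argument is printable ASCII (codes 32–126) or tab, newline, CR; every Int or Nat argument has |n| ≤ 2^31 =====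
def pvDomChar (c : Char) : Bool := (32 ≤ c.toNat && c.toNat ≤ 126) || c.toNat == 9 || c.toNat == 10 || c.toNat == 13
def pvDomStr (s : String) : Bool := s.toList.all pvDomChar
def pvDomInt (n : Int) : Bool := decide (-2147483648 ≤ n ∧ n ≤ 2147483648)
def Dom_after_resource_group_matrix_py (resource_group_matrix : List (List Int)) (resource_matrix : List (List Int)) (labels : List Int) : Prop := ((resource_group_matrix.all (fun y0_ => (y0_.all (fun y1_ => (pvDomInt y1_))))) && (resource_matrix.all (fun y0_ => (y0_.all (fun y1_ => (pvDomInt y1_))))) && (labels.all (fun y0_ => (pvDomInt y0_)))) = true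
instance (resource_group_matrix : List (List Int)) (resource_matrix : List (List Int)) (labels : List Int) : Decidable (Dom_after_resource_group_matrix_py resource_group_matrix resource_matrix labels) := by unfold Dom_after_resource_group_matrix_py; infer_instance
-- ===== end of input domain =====

-- B replaces A's per-group scan of all labels (O(R·L·C)) by a single scatter pass over
-- the labels; return values agree on every input where the Python A returns.

-- ===== PORT A =====
-- add_array: a[i] = a[i] + b[i] for i in range(len(a)); b shorter than a raises (excluded by Pre_)
def pvAddArray (a b : List Int) : List Int :=
  (List.range a.length).foldl (fun acc i => acc.set i (acc.getD i 0 + b.getD i 0)) a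

-- multiply_matrix: elementwise product, shape taken from the first argument
def pvMultiplyMatrix (cg rgm : List (List Int)) : List (List Int) :=
  (List.range cg.length).map (fun i =>
    (List.range (cg.getD 0 []).length).map (fun j =>
      ((cg.getD i []).getD j 0) * ((rgm.getD i []).getD j 0)))

def after_resource_group_matrix_py (resource_group_matrix : List (List Int)) (resource_matrix : List (List Int)) (labels : List Int) : List (List Int) :=
  let R := resource_group_matrix.length
  -- Python evaluates len(resource_group_matrix[0]) only when R > 0, so getD 0 [] is exact
  let C := (resource_group_matrix.getD 0 []).length
  let rgm0 : List (List Int) := List.replicate R (List.replicate C 0)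
  let rgm := (List.range R).foldl (fun rgm (rg : Nat) =>
      (List.range labels.length).foldl (fun rgm i =>
        if (rg : Int) = labels.getD i 0 then
          rgm.set rg (pvAddArray (rgm.getD rg []) (resource_matrix.getD i []))
        else rgm) rgm) rgm0
  pvMultiplyMatrix resource_group_matrix rgm

-- ===== PORT B =====
def after_resource_group_matrix_py_alt (resource_group_matrix : List (List Int)) (resource_matrix : List (List Int)) (labels : List Int) : List (List Int) :=
  let R := resource_group_matrix.length
  let C := (resource_group_matrix.getD 0 []).length
  let buckets := (List.range labels.length).foldl (fun buckets i =>
      let lbl := labels.getD i 0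
      if 0 ≤ lbl ∧ lbl < (R : Int) then
        let row := buckets.getD lbl.toNat []
        let src := resource_matrix.getD i []
        buckets.set lbl.toNat ((List.range C).map (fun j => row.getD j 0 + src.getD j 0))
      else buckets)
    (List.replicate R (List.replicate C 0))
  (List.range R).map (fun r => (List.range C).map (fun j =>
    ((resource_group_matrix.getD r []).getD j 0) * ((buckets.getD r []).getD j 0)))

-- ===== PRECONDITION & SPEC =====
-- Pre_ excludes exactly the inputs where the Python A raises an IndexError: a label in
-- [0, R) whose resource row is missing or shorter than the group-matrix width, or a
-- group-matrix row shorter than the width of the first row.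
def Pre_after_resource_group_matrix_py (resource_group_matrix : List (List Int)) (resource_matrix : List (List Int)) (labels : List Int) : Prop :=
  (∀ row ∈ resource_group_matrix, (resource_group_matrix.headD []).length ≤ row.length) ∧
  (∀ i ∈ List.range labels.length,
    (0 ≤ labels.getD i 0 ∧ labels.getD i 0 < (resource_group_matrix.length : Int)) →
      i < resource_matrix.length ∧ (resource_group_matrix.headD []).length ≤ (resource_matrix.getD i []).length)
instance (resource_group_matrix : List (List Int)) (resource_matrix : List (List Int)) (labels : List Int) : Decidable (Pre_after_resource_group_matrix_py resource_group_matrix resource_matrix labels) := by unfold Pre_after_resource_group_matrix_py; infer_instance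

def pvWitness_after_resource_group_matrix_py : List (List Int) × List (List Int) × List Int :=
  ([[1, 2], [3, 4]], [[5, 6], [7, 8], [9, 10]], [1, 0, 1])

def Spec_after_resource_group_matrix_py (resource_group_matrix : List (List Int)) (resource_matrix : List (List Int)) (labels : List Int) (out : List (List Int)) : Prop := out = after_resource_group_matrix_py_alt resource_group_matrix resource_matrix labels
instance (resource_group_matrix : List (List Int)) (resource_matrix : List (List Int)) (labels : List Int) (out : List (List Int)) : Decidable (Spec_after_resource_group_matrix_py resource_group_matrix resource_matrix labels out) := by unfold Spec_after_resource_group_matrix_py; infer_instance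

-- ===== CLAIM (what is proved, stated in full; the proofs are below) =====
def Claim_equal_after_resource_group_matrix_py : Prop := ∀ (resource_group_matrix : List (List Int)) (resource_matrix : List (List Int)) (labels : List Int), Dom_after_resource_group_matrix_py resource_group_matrix resource_matrix labels → Pre_after_resource_group_matrix_py resource_group_matrix resource_matrix labels → Spec_after_resource_group_matrix_py resource_group_matrix resource_matrix labels (after_resource_group_matrix_py resource_group_matrix resource_matrix labels)

-- ===== LEMMAS AND PROOFS =====

-- pvT m labels r j l: sum of (m[i])[j] over the indices i in l whose label is r
def pvT (m : List (List Int)) (labels : List Int) (r : Nat) (j : Nat) (l : List Nat) : Int :=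
  l.foldl (fun s i => if (r : Int) = labels.getD i 0 then s + (m.getD i []).getD j 0 else s) 0

theorem pvT_cons (m : List (List Int)) (labels : List Int) (r j : Nat) (i : Nat) (l : List Nat) :
    pvT m labels r j (i :: l)
      = (if (r : Int) = labels.getD i 0 then (m.getD i []).getD j 0 else 0) + pvT m labels r j l := by
  have H : ∀ (t : List Nat) (s : Int),
      t.foldl (fun s i => if (r : Int) = labels.getD i 0 then s + (m.getD i []).getD j 0 else s) s
        = s + t.foldl (fun s i => if (r : Int) = labels.getD i 0 then s + (m.getD i []).getD j 0 else s) 0 := by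
    intro t
    induction t with
    | nil => intro s; simp
    | cons a t ih =>
      intro s
      rw [List.foldl_cons, List.foldl_cons, ih _, ih (if (r : Int) = labels.getD a 0 then 0 + (m.getD a []).getD j 0 else 0)]
      split <;> ring
  unfold pvT
  rw [List.foldl_cons, H]
  split <;> ring

theorem getD_map_range {α : Type} (n j : Nat) (g : Nat → α) (d : α) (h : j < n) :
    (((List.range n).map g).getD j d) = g j := by
  simp [List.getD_eq_getElem?_getD, List.getElem?_range, h]

theorem set_map_range {α : Type} (n k : Nat) (g : Nat → α) (v : α) :
    ((List.range n).map g).set k v = (List.range n).map (fun r => if r = k then v else g r) := by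
  apply List.ext_getElem?
  intro i
  rw [List.getElem?_set]
  by_cases hik : i = k
  · subst hik
    by_cases hin : i < n <;>
      simp [List.getElem?_map, List.getElem?_range, hin]
  · by_cases hin : i < n
    · simp [List.getElem?_map, List.getElem?_range, hin, hik, Ne.symm hik]
    · rw [List.getElem?_eq_none (by simpa using by omega), List.getElem?_eq_none (by simpa using by omega)]
      simp [Ne.symm hik]

theorem foldl_set_range (b a : List Int) : ∀ n, n ≤ a.length →
    (List.range n).foldl (fun acc i => acc.set i (acc.getD i 0 + b.getD i 0)) a
      = ((List.range n).map (fun j => a.getD j 0 + b.getD j 0)) ++ a.drop n := by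
  intro n
  induction n with
  | zero => simp
  | succ n ih =>
    intro hn
    rw [List.range_succ, List.foldl_append, ih (by omega)]
    simp only [List.foldl_cons, List.foldl_nil]
    have hlen : ((List.range n).map (fun j => a.getD j 0 + b.getD j 0)).length = n := by simp
    have hget : (((List.range n).map (fun j => a.getD j 0 + b.getD j 0)) ++ a.drop n).getD n 0 = a.getD n 0 := by
      rw [List.getD_eq_getElem?_getD, List.getElem?_append_right (by omega), hlen]
      simp [List.getElem?_drop, List.getD_eq_getElem?_getD]
    rw [hget, List.set_append_right _ _ (by omega), hlen, Nat.sub_self,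
      List.drop_eq_getElem_cons (by omega : n < a.length), List.set_cons_zero]
    simp [List.map_append]

theorem pvAddArray_map_range (C : Nat) (f : Nat → Int) (b : List Int) :
    pvAddArray ((List.range C).map f) b
      = (List.range C).map (fun j => f j + b.getD j 0) := by
  unfold pvAddArray
  rw [List.length_map, List.length_range, foldl_set_range b _ C (by simp),
    List.drop_eq_nil_of_le (by simp), List.append_nil]
  apply List.map_congr_left
  intro j hj
  rw [getD_map_range _ _ _ _ (List.mem_range.mp hj)]

theorem getD_set_self {α : Type} (l : List α) (n : Nat) (v d : α) (h : n < l.length) :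
    (l.set n v).getD n d = v := by
  rw [List.getD_eq_getElem?_getD, List.getElem?_set]
  simp [h]

theorem set_getD_self {α : Type} (l : List α) (n : Nat) (d : α) (h : n < l.length) :
    l.set n (l.getD n d) = l := by
  apply List.ext_getElem?
  intro i
  rw [List.getElem?_set]
  by_cases hin : i = n
  · subst hin
    simp [List.getD_eq_getElem?_getD, List.getElem?_eq_getElem h, h]
  · simp [Ne.symm hin, hin]

theorem rowA_char (m : List (List Int)) (labels : List Int) (r C : Nat) :
    ∀ (l : List Nat) (f : Nat → Int),
      l.foldl (fun a i => if (r : Int) = labels.getD i 0 then pvAddArray a (m.getD i []) else a)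
          ((List.range C).map f)
        = (List.range C).map (fun j => f j + pvT m labels r j l) := by
  intro l
  induction l with
  | nil => intro f; simp [pvT]
  | cons i l ih =>
    intro f
    rw [List.foldl_cons]
    by_cases h : (r : Int) = labels.getD i 0
    · rw [if_pos h, pvAddArray_map_range, ih]
      apply List.map_congr_left
      intro j _
      rw [pvT_cons, if_pos h]; ring
    · rw [if_neg h, ih]
      apply List.map_congr_left
      intro j _
      rw [pvT_cons, if_neg h]; ring

theorem innerA (m : List (List Int)) (labels : List Int) (rg : Nat) :
    ∀ (l : List Nat) (rgm : List (List Int)), rg < rgm.length →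
      l.foldl (fun rgm i => if (rg : Int) = labels.getD i 0 then
            rgm.set rg (pvAddArray (rgm.getD rg []) (m.getD i [])) else rgm) rgm
        = rgm.set rg (l.foldl (fun a i => if (rg : Int) = labels.getD i 0 then
            pvAddArray a (m.getD i []) else a) (rgm.getD rg [])) := by
  intro l
  induction l with
  | nil =>
    intro rgm h
    rw [List.foldl_nil, List.foldl_nil, set_getD_self _ _ _ h]
  | cons i l ih =>
    intro rgm h
    rw [List.foldl_cons, List.foldl_cons]
    by_cases hc : (rg : Int) = labels.getD i 0
    · rw [if_pos hc, if_pos hc, ih _ (by simpa using h), List.set_set,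
        getD_set_self _ _ _ _ h]
    · rw [if_neg hc, if_neg hc, ih _ h]

theorem replicate_eq_map_range {α : Type} (n : Nat) (x : α) :
    List.replicate n x = (List.range n).map (fun _ => x) := by
  rw [List.map_const', List.length_range]

theorem outerA (m : List (List Int)) (labels : List Int) (R C : Nat) :
    ∀ n, n ≤ R →
      (List.range n).foldl (fun rgm (rg : Nat) =>
          (List.range labels.length).foldl (fun rgm i =>
            if (rg : Int) = labels.getD i 0 then
              rgm.set rg (pvAddArray (rgm.getD rg []) (m.getD i []))
            else rgm) rgm)
        (List.replicate R (List.replicate C 0))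
      = ((List.range n).map (fun rg =>
          (List.range C).map (fun j => pvT m labels rg j (List.range labels.length))))
        ++ List.replicate (R - n) (List.replicate C 0) := by
  intro n
  induction n with
  | zero => simp
  | succ n ih =>
    intro hn
    rw [List.range_succ, List.foldl_append, ih (by omega)]
    rw [List.foldl_cons, List.foldl_nil]
    have hlen : ((List.range n).map (fun rg =>
        (List.range C).map (fun j => pvT m labels rg j (List.range labels.length)))).length = n := by
      simp
    have hstate : (((List.range n).map (fun rg =>
        (List.range C).map (fun j => pvT m labels rg j (List.range labels.length))))
          ++ List.replicate (R - n) (List.replicate C 0)).length = R := by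
      simp; omega
    rw [innerA m labels n _ _ (by omega)]
    have hget : (((List.range n).map (fun rg =>
        (List.range C).map (fun j => pvT m labels rg j (List.range labels.length))))
          ++ List.replicate (R - n) (List.replicate C 0)).getD n [] = List.replicate C 0 := by
      rw [List.getD_eq_getElem?_getD, List.getElem?_append_right (by omega), hlen, Nat.sub_self]
      simp [List.getElem?_replicate, (by omega : 0 < R - n)]
    rw [hget, replicate_eq_map_range C (0 : Int), rowA_char]
    rw [List.set_append_right _ _ (by omega), hlen, Nat.sub_self]
    rw [show R - n = (R - n - 1) + 1 by omega, List.replicate_succ, List.set_cons_zero]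
    have hx : (List.range C).map (fun j => 0 + pvT m labels n j (List.range labels.length))
        = (List.range C).map (fun j => pvT m labels n j (List.range labels.length)) := by
      apply List.map_congr_left; intro j _; ring
    rw [List.map_append, ← Nat.sub_sub, hx]
    simp

theorem foldB_char (m : List (List Int)) (labels : List Int) (R C : Nat) :
    ∀ (l : List Nat) (f : Nat → Nat → Int),
      l.foldl (fun buckets i =>
          let lbl := labels.getD i 0
          if 0 ≤ lbl ∧ lbl < (R : Int) then
            let row := buckets.getD lbl.toNat []
            let src := m.getD i []
            buckets.set lbl.toNat ((List.range C).map (fun j => row.getD j 0 + src.getD j 0))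
          else buckets)
        ((List.range R).map (fun r => (List.range C).map (f r)))
      = (List.range R).map (fun r => (List.range C).map (fun j => f r j + pvT m labels r j l)) := by
  intro l
  induction l with
  | nil =>
    intro f
    rw [List.foldl_nil]
    apply List.map_congr_left; intro r _
    apply List.map_congr_left; intro j _
    simp [pvT]
  | cons i l ih =>
    intro f
    rw [List.foldl_cons]
    simp only []
    by_cases h : 0 ≤ labels.getD i 0 ∧ labels.getD i 0 < (R : Int)
    · rw [if_pos h]
      have hcast : ((labels.getD i 0).toNat : Int) = labels.getD i 0 := Int.toNat_of_nonneg h.1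
      have hr0 : (labels.getD i 0).toNat < R := by
        have := h.2; omega
      rw [getD_map_range _ _ _ _ hr0, set_map_range]
      have hmap : ((List.range R).map (fun r =>
            if r = (labels.getD i 0).toNat then
              (List.range C).map (fun j => ((List.range C).map (f (labels.getD i 0).toNat)).getD j 0 + (m.getD i []).getD j 0)
            else (List.range C).map (f r)))
          = (List.range R).map (fun r => (List.range C).map
              (fun j => if r = (labels.getD i 0).toNat then f r j + (m.getD i []).getD j 0 else f r j)) := by
        apply List.map_congr_left; intro r _
        by_cases hr : r = (labels.getD i 0).toNat
        · subst hr
          rw [if_pos rfl]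
          apply List.map_congr_left; intro j hj
          rw [getD_map_range _ _ _ _ (List.mem_range.mp hj), if_pos rfl]
        · rw [if_neg hr]
          apply List.map_congr_left; intro j _
          rw [if_neg hr]
      rw [hmap, ih]
      apply List.map_congr_left; intro r _
      apply List.map_congr_left; intro j _
      rw [pvT_cons]
      by_cases hr : r = (labels.getD i 0).toNat
      · subst hr
        rw [if_pos rfl, if_pos (by omega)]
        ring
      · rw [if_neg hr, if_neg (by intro hc; exact hr (by omega))]
        ring
    · rw [if_neg h]
      rw [ih]
      apply List.map_congr_left; intro r hrmem
      have hrR : r < R := List.mem_range.mp hrmem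
      apply List.map_congr_left; intro j _
      rw [pvT_cons, if_neg (by intro hc; exact h ⟨by omega, by omega⟩)]
      ring

theorem ports_eq (g m labels : _) :
    after_resource_group_matrix_py g m labels = after_resource_group_matrix_py_alt g m labels := by
  unfold after_resource_group_matrix_py after_resource_group_matrix_py_alt pvMultiplyMatrix
  simp only []
  rw [outerA m labels g.length (g.getD 0 []).length g.length (le_refl _),
    Nat.sub_self, List.replicate_zero, List.append_nil]
  rw [replicate_eq_map_range ((g.getD 0 []).length) (0 : Int),
    replicate_eq_map_range g.length ((List.range (g.getD 0 []).length).map (fun _ => (0 : Int)))]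
  rw [foldB_char m labels g.length (g.getD 0 []).length (List.range labels.length) (fun _ _ => 0)]
  have hz : (List.range g.length).map (fun r => (List.range (g.getD 0 []).length).map
        (fun j => (0 : Int) + pvT m labels r j (List.range labels.length)))
      = (List.range g.length).map (fun r => (List.range (g.getD 0 []).length).map
        (fun j => pvT m labels r j (List.range labels.length))) := by
    apply List.map_congr_left; intro r _
    apply List.map_congr_left; intro j _
    ring
  rw [hz]

-- ===== VERDICT (by name: the statement is the Claim_ definition above) =====
theorem after_resource_group_matrix_py_spec : Claim_equal_after_resource_group_matrix_py := by
  intro g m labels _ _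
  unfold Spec_after_resource_group_matrix_py
  exact ports_eq g m labels
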